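-- pv_equiv track=rewrite | github.com/codecraftsman12345/rentmate | app.py | simplify_balances
-- ===== SOURCE A (Python) =====
-- def simplify_balances(balances):
--     import heapq
--
--     creditors = []
--     debtors = []
--
--     for uid, amount in balances.items():
--         if amount > 0:
--             heapq.heappush(creditors, (-amount, uid))  # max heap
--         elif amount < 0:
--             heapq.heappush(debtors, (amount, uid))     # min heap
--
--     settlements = []
--     while creditors and debtors:
--         credit_amt, credit_uid = heapq.heappop(creditors)
--         debit_amt, debit_uid = heapq.heappop(debtors)
--
--         settle_amount = min(-debit_amt, -credit_amt)
--         settlements.append((debit_uid, credit_uid, settle_amount))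
--
--         new_credit = credit_amt + settle_amount
--         new_debit = debit_amt + settle_amount
--
--         if new_credit != 0:
--             heapq.heappush(creditors, (new_credit, credit_uid))
--         if new_debit != 0:
--             heapq.heappush(debtors, (new_debit, debit_uid))
--
--     return settlements
-- ===== SOURCE B (Python) =====
-- def simplify_balances(balances):
--     # Greedy settlement without heaps: keep plain lists of (uid, amount) and
--     # each round linearly scan for the largest creditor / most negative debtor
--     # (ties broken by smaller uid, matching Python tuple order).
--     def _pick(best, rest, key):
--         for e in rest:
--             if key(e) < key(best):
--                 best = e
--         return best
--
--     creditors = [(u, a) for u, a in balances.items() if a > 0]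
--     debtors = [(u, a) for u, a in balances.items() if a < 0]
--
--     settlements = []
--     while creditors and debtors:
--         cu, ca = _pick(creditors[0], creditors[1:], lambda p: (-p[1], p[0]))
--         du, da = _pick(debtors[0], debtors[1:], lambda p: (p[1], p[0]))
--         settle = min(ca, -da)
--         settlements.append((du, cu, settle))
--         creditors.remove((cu, ca))
--         debtors.remove((du, da))
--         if settle < ca:
--             creditors.append((cu, ca - settle))
--         if settle < -da:
--             debtors.append((du, da + settle))
--     return settlements
-- ===== Notes on version B (the rewrite author's own statement) =====
-- stated objective: simpler
-- what changed: Replaces the two heapq priority queues (push/pop with re-push of remainders) by plain lists that are linearly scanned each round for the extremal creditor/debtor, removing the updated entry or re-appending its remainder.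
import Mathlib
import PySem

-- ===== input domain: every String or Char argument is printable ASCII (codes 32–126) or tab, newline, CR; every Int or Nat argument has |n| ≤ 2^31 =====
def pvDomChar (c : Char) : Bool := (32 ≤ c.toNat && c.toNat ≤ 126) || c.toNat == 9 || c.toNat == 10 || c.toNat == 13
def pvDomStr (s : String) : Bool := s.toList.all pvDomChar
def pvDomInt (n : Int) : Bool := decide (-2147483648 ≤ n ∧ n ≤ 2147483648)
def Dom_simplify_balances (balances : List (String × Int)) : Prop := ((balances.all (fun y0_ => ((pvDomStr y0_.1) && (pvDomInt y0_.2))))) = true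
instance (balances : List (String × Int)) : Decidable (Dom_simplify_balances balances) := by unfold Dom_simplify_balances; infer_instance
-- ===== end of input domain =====

-- B replaces A's two heapq priority queues by plain lists scanned linearly for the extremal
-- creditor/debtor each round (objective: simpler; same greedy matching, same output).


-- ===== PORT A =====
-- Python tuple '<' on the (Int, str) pairs stored in the heaps
def pyLtA (a b : Int × String) : Bool :=
  decide (a.1 < b.1) || (decide (a.1 = b.1) && decide (a.2 < b.2))

-- heapq ported as a sorted-list priority queue: heappush inserts in tuple order, heappop
-- takes the head.  Exact here: heappop returns the least tuple, and any two equal tuples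
-- are interchangeable, so the popped VALUES are exactly Python's.
def hpushA (h : List (Int × String)) (x : Int × String) : List (Int × String) :=
  match h with
  | [] => [x]
  | y :: t => if pyLtA x y then x :: y :: t else y :: hpushA t x

theorem length_hpushA (h : List (Int × String)) (x : Int × String) :
    (hpushA h x).length = h.length + 1 := by
  induction h with
  | nil => rfl
  | cons y t ih => simp only [hpushA]; split <;> simp [ih]

-- the 'for uid, amount in balances.items()' heap-building loop
def buildA (items : List (String × Int)) (cs ds : List (Int × String)) :
    List (Int × String) × List (Int × String) :=
  match items with
  | [] => (cs, ds)
  | x :: rest =>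
    if x.2 > 0 then buildA rest (hpushA cs (-x.2, x.1)) ds
    else if x.2 < 0 then buildA rest cs (hpushA ds (x.2, x.1))
    else buildA rest cs ds

-- the 'while creditors and debtors' loop
def loopA (cs ds : List (Int × String)) : List (String × String × Int) :=
  match cs, ds with
  | c :: cs', d :: ds' =>
    let s := min (-d.1) (-c.1)
    let nc := c.1 + s
    let nd := d.1 + s
    (d.2, c.2, s) :: loopA (if nc ≠ 0 then hpushA cs' (nc, c.2) else cs')
                           (if nd ≠ 0 then hpushA ds' (nd, d.2) else ds')
  | _, _ => []
termination_by cs.length + ds.length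
decreasing_by
  rcases min_choice (-d.1) (-c.1) with h | h <;>
    split <;> split <;> simp_all [length_hpushA] <;> omega

def simplify_balances (balances : List (String × Int)) : List (String × String × Int) :=
  let items := (PySem.Dict.ofList balances).items
  let r := buildA items [] []
  loopA r.1 r.2

-- ===== PORT B =====
-- Python tuple '<' on the (Int, str) selection keys
def keyLtB (a b : Int × String) : Bool :=
  decide (a.1 < b.1) || (decide (a.1 = b.1) && decide (a.2 < b.2))

def keyC (p : String × Int) : Int × String := (-p.2, p.1)
def keyD (p : String × Int) : Int × String := (p.2, p.1)

-- _pick: linear scan for the first key-minimal entry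
def pickB (k : String × Int → Int × String) (best : String × Int)
    (rest : List (String × Int)) : String × Int :=
  rest.foldl (fun best e => if keyLtB (k e) (k best) then e else best) best

-- list.remove(v); exact here: the removed value is always a member
def removeFirstB (xs : List (String × Int)) (v : String × Int) : List (String × Int) :=
  match xs with
  | [] => []
  | x :: t => if x = v then t else x :: removeFirstB t v

theorem pickB_mem (k : String × Int → Int × String) (best : String × Int)
    (rest : List (String × Int)) : pickB k best rest ∈ best :: rest := by
  induction rest generalizing best with
  | nil => simp [pickB]
  | cons e t ih =>
    rw [show pickB k best (e :: t) = pickB k (if keyLtB (k e) (k best) then e else best) t from rfl]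
    rcases List.mem_cons.1 (ih (if keyLtB (k e) (k best) then e else best)) with h | h
    · rw [h]; split <;> simp
    · simp [h]

theorem length_removeFirstB (xs : List (String × Int)) (v : String × Int)
    (h : v ∈ xs) : (removeFirstB xs v).length + 1 = xs.length := by
  induction xs with
  | nil => cases h
  | cons x t ih =>
    simp only [removeFirstB]
    split
    · simp
    · rename_i hne
      rcases List.mem_cons.1 h with h | h
      · exact absurd h.symm hne
      · simpa using ih h

-- the 'while creditors and debtors' loop of B
def loopB (cs ds : List (String × Int)) : List (String × String × Int) :=
  match cs, ds with
  | cb :: ct, db :: dt =>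
    let c := pickB keyC cb ct
    let d := pickB keyD db dt
    let s := min c.2 (-d.2)
    (d.1, c.1, s) :: loopB (removeFirstB (cb :: ct) c ++ (if s < c.2 then [(c.1, c.2 - s)] else []))
                           (removeFirstB (db :: dt) d ++ (if s < -d.2 then [(d.1, d.2 + s)] else []))
  | _, _ => []
termination_by cs.length + ds.length
decreasing_by
  have hc := length_removeFirstB (cb :: ct) (pickB keyC cb ct) (pickB_mem _ _ _)
  have hd := length_removeFirstB (db :: dt) (pickB keyD db dt) (pickB_mem _ _ _)
  rcases min_choice (pickB keyC cb ct).2 (-(pickB keyD db dt).2) with h | h <;>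
    split <;> split <;> simp_all [List.length_append] <;> omega

def simplify_balances_alt (balances : List (String × Int)) : List (String × String × Int) :=
  let items := (PySem.Dict.ofList balances).items
  loopB (items.filter (fun p => p.2 > 0)) (items.filter (fun p => p.2 < 0))

-- ===== PRECONDITION & SPEC =====
def Spec_simplify_balances (balances : List (String × Int)) (out : List (String × String × Int)) : Prop := out = simplify_balances_alt balances
instance (balances : List (String × Int)) (out : List (String × String × Int)) : Decidable (Spec_simplify_balances balances out) := by unfold Spec_simplify_balances; infer_instance

-- ===== CLAIM (what is proved, stated in full; the proofs are below) =====
def Claim_equal_simplify_balances : Prop := ∀ (balances : List (String × Int)), Dom_simplify_balances balances → Spec_simplify_balances balances (simplify_balances balances)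

-- ===== LEMMAS AND PROOFS =====

-- Python tuple '≤' as a Prop
def PyLe (a b : Int × String) : Prop := a.1 < b.1 ∨ (a.1 = b.1 ∧ a.2 ≤ b.2)

theorem PyLe_refl (a : Int × String) : PyLe a a := Or.inr ⟨rfl, le_refl _⟩

theorem PyLe_trans {a b c : Int × String} (h1 : PyLe a b) (h2 : PyLe b c) : PyLe a c := by
  rcases h1 with h1 | ⟨h1, h1'⟩ <;> rcases h2 with h2 | ⟨h2, h2'⟩
  · exact Or.inl (h1.trans h2)
  · exact Or.inl (h2 ▸ h1)
  · exact Or.inl (h1 ▸ h2)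
  · exact Or.inr ⟨h1.trans h2, h1'.trans h2'⟩

theorem PyLe_antisymm {a b : Int × String} (h1 : PyLe a b) (h2 : PyLe b a) : a = b := by
  rcases h1 with h1 | ⟨h1, h1'⟩ <;> rcases h2 with h2 | ⟨h2, h2'⟩ <;>
    [exact absurd (h1.trans h2) (lt_irrefl _); exact absurd h1 (h2 ▸ lt_irrefl _);
     exact absurd h2 (h1 ▸ lt_irrefl _);
     exact Prod.ext h1 (le_antisymm h1' h2')]

theorem pyLt_le {a b : Int × String} (h : pyLtA a b = true) : PyLe a b := by
  simp only [pyLtA, Bool.or_eq_true, Bool.and_eq_true, decide_eq_true_eq] at h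
  rcases h with h | ⟨h, h'⟩
  · exact Or.inl h
  · exact Or.inr ⟨h, le_of_lt h'⟩

theorem pyLt_false_le {a b : Int × String} (h : pyLtA a b = false) : PyLe b a := by
  simp only [pyLtA, Bool.or_eq_false_iff, Bool.and_eq_false_iff, decide_eq_false_iff_not] at h
  obtain ⟨h1, h2⟩ := h
  rcases lt_or_eq_of_le (not_lt.mp h1) with hlt | heq
  · exact Or.inl hlt
  · refine Or.inr ⟨heq, ?_⟩
    rcases h2 with h2 | h2
    · exact absurd heq.symm h2
    · exact not_lt.mp h2

theorem hpushA_perm (h : List (Int × String)) (x : Int × String) :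
    (hpushA h x).Perm (x :: h) := by
  induction h with
  | nil => rfl
  | cons y t ih =>
    simp only [hpushA]
    split
    · rfl
    · exact (ih.cons y).trans (List.Perm.swap x y t)

theorem hpushA_pairwise {h : List (Int × String)} (hp : h.Pairwise PyLe) (x : Int × String) :
    (hpushA h x).Pairwise PyLe := by
  induction h with
  | nil => simp [hpushA]
  | cons y t ih =>
    rcases List.pairwise_cons.1 hp with ⟨hy, ht⟩
    simp only [hpushA]
    split
    · rename_i hlt
      exact List.pairwise_cons.2 ⟨by
        intro z hz
        rcases List.mem_cons.1 hz with rfl | hz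
        · exact pyLt_le hlt
        · exact PyLe_trans (pyLt_le hlt) (hy z hz), hp⟩
    · rename_i hnlt
      refine List.pairwise_cons.2 ⟨?_, ih ht⟩
      intro z hz
      have := (hpushA_perm t x).mem_iff.1 hz
      rcases List.mem_cons.1 this with rfl | hz'
      · exact pyLt_false_le (Bool.eq_false_iff.2 hnlt)
      · exact hy z hz'

theorem removeFirstB_perm {xs : List (String × Int)} {v : String × Int} (h : v ∈ xs) :
    xs.Perm (v :: removeFirstB xs v) := by
  induction xs with
  | nil => cases h
  | cons x t ih =>
    simp only [removeFirstB]
    split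
    · rename_i he; subst he; rfl
    · rename_i hne
      rcases List.mem_cons.1 h with h | h
      · exact absurd h.symm hne
      · exact ((ih h).cons x).trans (List.Perm.swap v x _)

theorem pickB_min (k : String × Int → Int × String) (best : String × Int)
    (rest : List (String × Int)) :
    ∀ e ∈ best :: rest, PyLe (k (pickB k best rest)) (k e) := by
  induction rest generalizing best with
  | nil => intro e he; simp at he; subst he; exact PyLe_refl _
  | cons e t ih =>
    intro z hz
    rw [show pickB k best (e :: t) = pickB k (if keyLtB (k e) (k best) then e else best) t from rfl]
    by_cases hlt : keyLtB (k e) (k best) = true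
    · rw [if_pos hlt]
      have step := ih e
      rcases List.mem_cons.1 hz with rfl | hz
      · exact PyLe_trans (step _ List.mem_cons_self) (pyLt_le hlt)
      · rcases List.mem_cons.1 hz with rfl | hz
        · exact step _ List.mem_cons_self
        · exact step _ (List.mem_cons.2 (Or.inr hz))
    · rw [if_neg hlt]
      have step := ih best
      rcases List.mem_cons.1 hz with rfl | hz
      · exact step _ List.mem_cons_self
      · rcases List.mem_cons.1 hz with rfl | hz
        · exact PyLe_trans (step _ List.mem_cons_self)
            (pyLt_false_le (Bool.eq_false_iff.2 hlt))
        · exact step _ (List.mem_cons.2 (Or.inr hz))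

-- the selected entry's key is exactly the head of the sorted A-side list
theorem pick_eq (k : String × Int → Int × String) {b0 : String × Int}
    {t : List (String × Int)} {c : Int × String} {a' : List (Int × String)}
    (hperm : (c :: a').Perm ((b0 :: t).map k)) (hpair : (c :: a').Pairwise PyLe) :
    k (pickB k b0 t) = c := by
  have hy := pickB_mem k b0 t
  have hymin := pickB_min k b0 t
  have hcmem : c ∈ (b0 :: t).map k := hperm.mem_iff.1 (List.mem_cons_self)
  rcases List.mem_map.1 hcmem with ⟨y', hy', hky'⟩
  have h1 : PyLe (k (pickB k b0 t)) c := hky' ▸ hymin y' hy'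
  have h2 : PyLe c (k (pickB k b0 t)) := by
    have : k (pickB k b0 t) ∈ c :: a' :=
      hperm.symm.mem_iff.1 (List.mem_map.2 ⟨_, hy, rfl⟩)
    rcases List.mem_cons.1 this with he | hm
    · exact he ▸ PyLe_refl _
    · exact (List.pairwise_cons.1 hpair).1 _ hm
  exact PyLe_antisymm h1 h2

theorem loopA_nil_left (d : List (Int × String)) : loopA [] d = [] := by rw [loopA]; simp
theorem loopA_nil_right (c : List (Int × String)) : loopA c [] = [] := by rw [loopA]; simp
theorem loopB_nil_left (d : List (String × Int)) : loopB [] d = [] := by rw [loopB]; simp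
theorem loopB_nil_right (c : List (String × Int)) : loopB c [] = [] := by rw [loopB]; simp

-- main loop equivalence: A's heaps and B's scanned lists hold the same multiset of keys
theorem loop_eq (n : Nat) :
    ∀ (csA dsA : List (Int × String)) (csB dsB : List (String × Int)),
      csA.length + dsA.length ≤ n →
      csA.Pairwise PyLe → dsA.Pairwise PyLe →
      csA.Perm (csB.map keyC) → dsA.Perm (dsB.map keyD) →
      loopA csA dsA = loopB csB dsB := by
  induction n with
  | zero =>
    intro csA dsA csB dsB hlen _ _ hperm _
    have hA : csA = [] := by cases csA <;> simp_all
    subst hA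
    have hB : csB = [] := List.map_eq_nil_iff.1 hperm.symm.eq_nil
    subst hB
    rw [loopA_nil_left, loopB_nil_left]
  | succ n ih =>
    intro csA dsA csB dsB hlen hpc hpd hperm hpermd
    cases csA with
    | nil =>
      have hB : csB = [] := List.map_eq_nil_iff.1 hperm.symm.eq_nil
      subst hB
      rw [loopA_nil_left, loopB_nil_left]
    | cons c ct =>
    cases dsA with
    | nil =>
      have hB : dsB = [] := List.map_eq_nil_iff.1 hpermd.symm.eq_nil
      subst hB
      rw [loopA_nil_right, loopB_nil_right]
    | cons d dt =>
    cases csB with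
    | nil => exact absurd hperm.eq_nil (by simp)
    | cons cb cbt =>
    cases dsB with
    | nil => exact absurd hpermd.eq_nil (by simp)
    | cons db dbt =>
    have hc : keyC (pickB keyC cb cbt) = c := pick_eq keyC hperm hpc
    have hdk : keyD (pickB keyD db dbt) = d := pick_eq keyD hpermd hpd
    have hy1 : (pickB keyC cb cbt).1 = c.2 := congrArg Prod.snd hc
    have hy2 : (pickB keyC cb cbt).2 = -c.1 := by
      have := congrArg Prod.fst hc; simp only [keyC] at this; omega
    have hz1 : (pickB keyD db dbt).1 = d.2 := congrArg Prod.snd hdk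
    have hz2 : (pickB keyD db dbt).2 = d.1 := congrArg Prod.fst hdk
    have hrem_c : ct.Perm ((removeFirstB (cb :: cbt) (pickB keyC cb cbt)).map keyC) := by
      have h1 := (removeFirstB_perm (pickB_mem keyC cb cbt)).map keyC
      have h2 := hperm.trans h1
      rw [List.map_cons, hc] at h2
      exact h2.cons_inv
    have hrem_d : dt.Perm ((removeFirstB (db :: dbt) (pickB keyD db dbt)).map keyD) := by
      have h1 := (removeFirstB_perm (pickB_mem keyD db dbt)).map keyD
      have h2 := hpermd.trans h1
      rw [List.map_cons, hdk] at h2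
      exact h2.cons_inv
    have hpc' := (List.pairwise_cons.1 hpc).2
    have hpd' := (List.pairwise_cons.1 hpd).2
    rw [loopA, loopB]
    have hs : min (pickB keyC cb cbt).2 (-(pickB keyD db dbt).2) = min (-d.1) (-c.1) := by
      rw [hy2, hz2]; exact min_comm _ _
    congr 1
    · rw [hy1, hz1, hs]
    · have hsc : min (-d.1) (-c.1) ≤ -c.1 := min_le_right _ _
      have hsd : min (-d.1) (-c.1) ≤ -d.1 := min_le_left _ _
      have hchoice := min_choice (-d.1) (-c.1)
      rw [hs, hy2, hz2]
      by_cases hcs : min (-d.1) (-c.1) < -c.1 <;> by_cases hds : min (-d.1) (-c.1) < -d.1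
      · rcases hchoice with h | h <;> omega
      · -- creditor keeps a remainder, debtor is exhausted
        rw [if_pos (by omega : c.1 + min (-d.1) (-c.1) ≠ 0), if_pos hcs,
            if_neg (by omega : ¬ d.1 + min (-d.1) (-c.1) ≠ 0), if_neg hds]
        apply ih
        · have h1 := length_removeFirstB (cb :: cbt) (pickB keyC cb cbt) (pickB_mem keyC cb cbt)
          have h2 := hrem_c.length_eq
          have h3 := hrem_d.length_eq
          simp only [length_hpushA, List.length_map, List.length_cons] at *
          omega
        · exact hpushA_pairwise hpc' _
        · exact hpd'
        · have hkey : keyC ((pickB keyC cb cbt).1, -c.1 - min (-d.1) (-c.1)) =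
              (c.1 + min (-d.1) (-c.1), c.2) := by
            simp only [keyC, hy1, Prod.mk.injEq]
            exact ⟨by omega, trivial⟩
          refine ((hpushA_perm ct _).trans ((hrem_c.cons _).trans ?_))
          rw [List.map_append]
          simp only [List.map_cons, List.map_nil, hkey]
          exact (List.perm_append_singleton _ _).symm
        · simpa using hrem_d
      · -- debtor keeps a remainder, creditor is exhausted
        rw [if_neg (by omega : ¬ c.1 + min (-d.1) (-c.1) ≠ 0), if_neg hcs,
            if_pos (by omega : d.1 + min (-d.1) (-c.1) ≠ 0), if_pos hds]
        apply ih
        · have h1 := length_removeFirstB (db :: dbt) (pickB keyD db dbt) (pickB_mem keyD db dbt)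
          have h2 := hrem_c.length_eq
          have h3 := hrem_d.length_eq
          simp only [length_hpushA, List.length_map, List.length_cons] at *
          omega
        · exact hpc'
        · exact hpushA_pairwise hpd' _
        · simpa using hrem_c
        · have hkey : keyD ((pickB keyD db dbt).1, d.1 + min (-d.1) (-c.1)) =
              (d.1 + min (-d.1) (-c.1), d.2) := by
            simp only [keyD, hz1]
          refine ((hpushA_perm dt _).trans ((hrem_d.cons _).trans ?_))
          rw [List.map_append]
          simp only [List.map_cons, List.map_nil, hkey]
          exact (List.perm_append_singleton _ _).symm
      · -- both exhausted
        rw [if_neg (by omega : ¬ c.1 + min (-d.1) (-c.1) ≠ 0), if_neg hcs,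
            if_neg (by omega : ¬ d.1 + min (-d.1) (-c.1) ≠ 0), if_neg hds]
        apply ih
        · have h1 := length_removeFirstB (cb :: cbt) (pickB keyC cb cbt) (pickB_mem keyC cb cbt)
          have h2 := hrem_c.length_eq
          have h3 := hrem_d.length_eq
          simp only [List.length_map, List.length_cons] at *
          omega
        · exact hpc'
        · exact hpd'
        · simpa using hrem_c
        · simpa using hrem_d

theorem buildA_spec (items : List (String × Int)) :
    ∀ (cs ds : List (Int × String)), cs.Pairwise PyLe → ds.Pairwise PyLe →
      (buildA items cs ds).1.Pairwise PyLe ∧ (buildA items cs ds).2.Pairwise PyLe ∧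
      (buildA items cs ds).1.Perm (cs ++ (items.filter (fun p => p.2 > 0)).map keyC) ∧
      (buildA items cs ds).2.Perm (ds ++ (items.filter (fun p => p.2 < 0)).map keyD) := by
  induction items with
  | nil => intro cs ds h1 h2; simpa [buildA] using ⟨h1, h2⟩
  | cons x rest ih =>
    intro cs ds h1 h2
    simp only [buildA]
    by_cases hp : x.2 > 0
    · rw [if_pos hp]
      obtain ⟨a1, a2, a3, a4⟩ := ih (hpushA cs (-x.2, x.1)) ds (hpushA_pairwise h1 _) h2
      refine ⟨a1, a2, ?_, ?_⟩
      · rw [List.filter_cons_of_pos (by simpa using hp)]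
        refine a3.trans ?_
        simp only [List.map_cons]
        exact (((hpushA_perm cs _).append_right _).trans List.perm_middle.symm)
      · rw [List.filter_cons_of_neg (by simp; omega)]
        exact a4
    · rw [if_neg hp]
      by_cases hn : x.2 < 0
      · rw [if_pos hn]
        obtain ⟨a1, a2, a3, a4⟩ := ih cs (hpushA ds (x.2, x.1)) h1 (hpushA_pairwise h2 _)
        refine ⟨a1, a2, ?_, ?_⟩
        · rw [List.filter_cons_of_neg (by simpa using hp)]
          exact a3
        · rw [List.filter_cons_of_pos (by simpa using hn)]
          refine a4.trans ?_
          simp only [List.map_cons]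
          exact (((hpushA_perm ds _).append_right _).trans List.perm_middle.symm)
      · rw [if_neg hn]
        obtain ⟨a1, a2, a3, a4⟩ := ih cs ds h1 h2
        refine ⟨a1, a2, ?_, ?_⟩
        · rw [List.filter_cons_of_neg (by simpa using hp)]
          exact a3
        · rw [List.filter_cons_of_neg (by simpa using hn)]
          exact a4

-- ===== VERDICT (by name: the statement is the Claim_ definition above) =====
theorem simplify_balances_spec : Claim_equal_simplify_balances := by
  intro balances _
  unfold Spec_simplify_balances simplify_balances simplify_balances_alt
  obtain ⟨h1, h2, h3, h4⟩ :=
    buildA_spec (PySem.Dict.ofList balances).items [] [] (by simp) (by simp)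
  exact loop_eq _ _ _ _ _ (le_refl _) h1 h2 (by simpa using h3) (by simpa using h4)
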